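-- pv_equiv track=rewrite | github.com/jeffvestal/portfolio-pilot-ai | backend/action_item_service.py | _get_affected_accounts_from_alerts
-- ===== SOURCE A (Python) =====
-- from typing import Dict, List, Any, Optional
--
-- def _get_affected_accounts_from_alerts(alerts: List[Dict[str, Any]],
--                                      top_accounts: List[Dict[str, Any]]) -> List[Dict[str, Any]]:
--     """Get list of affected accounts from alerts"""
--     affected_account_ids = {alert.get("account_id") for alert in alerts}
--
--     affected_accounts = []
--     for account in top_accounts:
--         if account["account_id"] in affected_account_ids:
--             affected_accounts.append(account)
--
--     return affected_accounts
-- ===== SOURCE B (Python) =====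
-- def _get_affected_accounts_from_alerts(alerts, top_accounts):
--     """Get list of affected accounts from alerts"""
--     # Inverted join: index top_accounts by account_id -> positions,
--     # scan the alerts once collecting matched positions, emit them in sorted order.
--     positions = {}
--     for pos, account in enumerate(top_accounts):
--         positions.setdefault(account["account_id"], []).append(pos)
--
--     hit = set()
--     for alert in alerts:
--         hit.update(positions.get(alert.get("account_id"), ()))
--
--     return [top_accounts[pos] for pos in sorted(hit)]
-- ===== Notes on version B (the rewrite author's own statement) =====
-- stated objective: alternative
-- what changed: B inverts the join direction: instead of building a set of alert ids and filtering top_accounts by membership, it builds an inverted index from account_id to the positions in top_accounts, scans the alerts once collecting matched positions into a set, and reconstructs the output by sorting those positions.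
import Mathlib
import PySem

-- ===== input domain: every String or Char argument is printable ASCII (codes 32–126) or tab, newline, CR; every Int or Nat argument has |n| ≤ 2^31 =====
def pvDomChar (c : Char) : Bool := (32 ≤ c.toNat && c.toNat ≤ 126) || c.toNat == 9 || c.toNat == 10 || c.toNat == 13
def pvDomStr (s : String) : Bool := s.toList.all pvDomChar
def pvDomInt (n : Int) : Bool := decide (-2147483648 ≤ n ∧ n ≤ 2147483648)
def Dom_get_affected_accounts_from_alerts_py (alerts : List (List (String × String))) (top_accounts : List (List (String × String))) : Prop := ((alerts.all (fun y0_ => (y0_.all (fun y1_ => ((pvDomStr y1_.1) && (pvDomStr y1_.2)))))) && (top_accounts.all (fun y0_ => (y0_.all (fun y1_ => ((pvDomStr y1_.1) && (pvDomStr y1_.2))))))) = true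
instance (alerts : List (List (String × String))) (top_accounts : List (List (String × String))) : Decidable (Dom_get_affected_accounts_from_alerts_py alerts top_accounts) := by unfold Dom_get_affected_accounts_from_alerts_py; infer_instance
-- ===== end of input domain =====

-- B inverts the join: instead of filtering top_accounts by a set of alert ids, it builds an
-- inverted index account_id -> positions in top_accounts, scans the alerts collecting matched
-- positions, and rebuilds the output by sorting those positions (alternative, no speed claim).


-- shared dict lookup: d.get("account_id") / d["account_id"] (some = present)
def pvGetAccountId (d : List (String × String)) : Option String :=
  (PySem.Dict.ofList d).get? "account_id"

-- ===== PORT A =====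
def get_affected_accounts_from_alerts_py (alerts : List (List (String × String))) (top_accounts : List (List (String × String))) : List (List (String × String)) :=
  -- affected_account_ids = {alert.get("account_id") for alert in alerts}
  let affected_account_ids : PySem.Set (Option String) :=
    PySem.Set.ofList (alerts.map (fun alert => pvGetAccountId alert))
  -- for account in top_accounts: if account["account_id"] in ...: append
  top_accounts.foldl
    (fun affected_accounts account =>
      if PySem.Set.contains affected_account_ids (pvGetAccountId account)
      then affected_accounts ++ [account] else affected_accounts) []

-- ===== PORT B =====
-- positions = {}; for pos, account in enumerate(top_accounts):
--     positions.setdefault(account["account_id"], []).append(pos)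
def pvAltPositions (top_accounts : List (List (String × String))) : PySem.Dict (Option String) (List Int) :=
  (PySem.List.enumerate top_accounts).foldl
    (fun d p => d.modify (pvGetAccountId p.2) [] (· ++ [p.1])) PySem.Dict.empty

def get_affected_accounts_from_alerts_py_alt (alerts : List (List (String × String))) (top_accounts : List (List (String × String))) : List (List (String × String)) :=
  let positions := pvAltPositions top_accounts
  -- hit = set(); for alert in alerts: hit.update(positions.get(alert.get("account_id"), ()))
  let hit : PySem.Set Int := alerts.foldl
    (fun s alert => PySem.Set.update s (positions.getD (pvGetAccountId alert) [])) PySem.Set.empty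
  -- [top_accounts[pos] for pos in sorted(hit)]  (every pos comes from enumerate, hence in
  -- range: pyGetD's default is never reached, matching Python's never-raising subscript here)
  (PySem.List.sorted hit (fun x => x) false).map
    (fun pos => PySem.List.pyGetD top_accounts pos [])

-- ===== PRECONDITION & SPEC =====
-- Pre_ excludes top accounts lacking the "account_id" key, where both A's and B's
-- subscript account["account_id"] raises KeyError.
def Pre_get_affected_accounts_from_alerts_py (alerts : List (List (String × String))) (top_accounts : List (List (String × String))) : Prop :=
  ∀ account ∈ top_accounts, (pvGetAccountId account).isSome
instance (alerts : List (List (String × String))) (top_accounts : List (List (String × String))) : Decidable (Pre_get_affected_accounts_from_alerts_py alerts top_accounts) := by unfold Pre_get_affected_accounts_from_alerts_py; infer_instance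
def pvWitness_get_affected_accounts_from_alerts_py : (List (List (String × String))) × (List (List (String × String))) :=
  ([[("account_id", "A1")], [("other", "x")]], [[("account_id", "A1"), ("name", "n")], [("account_id", "B2")]])

def Spec_get_affected_accounts_from_alerts_py (alerts : List (List (String × String))) (top_accounts : List (List (String × String))) (out : List (List (String × String))) : Prop := out = get_affected_accounts_from_alerts_py_alt alerts top_accounts
instance (alerts : List (List (String × String))) (top_accounts : List (List (String × String))) (out : List (List (String × String))) : Decidable (Spec_get_affected_accounts_from_alerts_py alerts top_accounts out) := by unfold Spec_get_affected_accounts_from_alerts_py; infer_instance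

-- ===== CLAIM (what is proved, stated in full; the proofs are below) =====
def Claim_equal_get_affected_accounts_from_alerts_py : Prop := ∀ (alerts : List (List (String × String))) (top_accounts : List (List (String × String))), Dom_get_affected_accounts_from_alerts_py alerts top_accounts → Pre_get_affected_accounts_from_alerts_py alerts top_accounts → Spec_get_affected_accounts_from_alerts_py alerts top_accounts (get_affected_accounts_from_alerts_py alerts top_accounts)

-- ===== LEMMAS AND PROOFS =====
-- the membership condition both programs decide, as a Bool on one account
def pvHitCond (alerts : List (List (String × String))) (a : List (String × String)) : Bool :=
  decide (pvGetAccountId a ∈ alerts.map (fun alert => pvGetAccountId alert))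

theorem pvA_eq_filter (alerts top_accounts : List (List (String × String))) :
    get_affected_accounts_from_alerts_py alerts top_accounts
      = top_accounts.filter (pvHitCond alerts) := by
  have h : ∀ a, PySem.Set.contains (PySem.Set.ofList (alerts.map (fun alert => pvGetAccountId alert))) (pvGetAccountId a) = pvHitCond alerts a := by
    intro a
    rw [Bool.eq_iff_iff, PySem.Set.contains_iff, PySem.Set.mem_ofList, pvHitCond, decide_eq_true_iff]
  simp only [get_affected_accounts_from_alerts_py, h]
  simpa using PySem.List.foldl_append_if (pvHitCond alerts) (fun a => a) top_accounts []

theorem pvPositions_getD (top_accounts : List (List (String × String))) (k : Option String) :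
    (pvAltPositions top_accounts).getD k []
      = ((PySem.List.enumerate top_accounts).filter
          (fun p => pvGetAccountId p.2 == k)).map (·.1) := by
  have : pvAltPositions top_accounts
      = ((PySem.List.enumerate top_accounts).map (fun p => (pvGetAccountId p.2, p.1))).foldl
          (fun d q => d.modify q.1 [] (· ++ [q.2])) PySem.Dict.empty := by
    rw [List.foldl_map]; rfl
  rw [this, PySem.Dict.getD_foldl_modify_append]
  simp [List.filter_map, List.map_map, Function.comp_def]

theorem pvMem_foldl_update {α β : Type} [BEq α] [LawfulBEq α]
    (l : List β) (g : β → List α) (s : PySem.Set α) (x : α) :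
    x ∈ l.foldl (fun s b => PySem.Set.update s (g b)) s ↔ x ∈ s ∨ ∃ b ∈ l, x ∈ g b := by
  induction l generalizing s with
  | nil => simp
  | cons b l ih =>
    simp only [List.foldl_cons, ih, PySem.Set.mem_update, List.mem_cons]
    constructor
    · rintro ((h | h) | ⟨c, hc, hx⟩)
      · exact Or.inl h
      · exact Or.inr ⟨b, Or.inl rfl, h⟩
      · exact Or.inr ⟨c, Or.inr hc, hx⟩
    · rintro (h | ⟨c, (rfl | hc), hx⟩)
      · exact Or.inl (Or.inl h)
      · exact Or.inl (Or.inr hx)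
      · exact Or.inr ⟨c, hc, hx⟩

theorem pvNodup_foldl_update {α β : Type} [BEq α] [LawfulBEq α]
    (l : List β) (g : β → List α) (s : PySem.Set α) (h : s.Nodup) :
    (l.foldl (fun s b => PySem.Set.update s (g b)) s).Nodup := by
  induction l generalizing s with
  | nil => exact h
  | cons b l ih => exact ih _ (PySem.Set.nodup_update s (g b) h)

theorem pvEnum_filter_map_snd {α : Type} (xs : List α) (q : α → Bool) (st : Int) :
    ((PySem.List.enumerate xs st).filter (fun p => q p.2)).map (·.2) = xs.filter q := by
  induction xs generalizing st with
  | nil => simp [PySem.List.enumerate]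
  | cons x xs ih =>
    rw [PySem.List.enumerate_cons]
    by_cases hq : q x
    · simp [hq, ih]
    · simp [hq, ih]

theorem pvAB_eq (alerts top_accounts : List (List (String × String))) :
    get_affected_accounts_from_alerts_py alerts top_accounts
      = get_affected_accounts_from_alerts_py_alt alerts top_accounts := by
  rw [pvA_eq_filter]
  simp only [get_affected_accounts_from_alerts_py_alt]
  set hit : PySem.Set Int := alerts.foldl
    (fun s alert => PySem.Set.update s ((pvAltPositions top_accounts).getD (pvGetAccountId alert) [])) PySem.Set.empty with hhit
  set P : List Int := ((PySem.List.enumerate top_accounts).filter (fun p => pvHitCond alerts p.2)).map (·.1) with hP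
  have hpairP : P.Pairwise (· < ·) := by
    rw [hP, List.pairwise_map]
    exact (PySem.List.pairwise_lt_enumerate top_accounts 0).filter _
  have hmem : ∀ x : Int, x ∈ P ↔ x ∈ hit := by
    intro x
    rw [hhit, pvMem_foldl_update]
    simp only [hP, List.mem_map, List.mem_filter, pvPositions_getD, pvHitCond,
      decide_eq_true_iff, List.mem_map, beq_iff_eq, PySem.Set.empty]
    constructor
    · rintro ⟨p, ⟨hp, a, ha, hid⟩, rfl⟩
      exact Or.inr ⟨a, ha, p, ⟨hp, hid.symm⟩, rfl⟩
    · rintro (h | ⟨a, ha, p, ⟨hp, hid⟩, rfl⟩)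
      · simp at h
      · exact ⟨p, ⟨hp, a, ha, hid.symm⟩, rfl⟩
  have hnHit : hit.Nodup := by
    rw [hhit]; exact pvNodup_foldl_update _ _ _ List.nodup_nil
  have hperm : P.Perm hit :=
    (List.perm_ext_iff_of_nodup (hpairP.imp fun h => ne_of_lt h) hnHit).mpr hmem
  have hsorted : PySem.List.sorted hit (fun x => x) = P :=
    PySem.List.sorted_eq_of_perm_of_pairwise_lt hit P _ hperm hpairP
  rw [hsorted, hP, List.map_map]
  have : ∀ p ∈ (PySem.List.enumerate top_accounts).filter (fun p => pvHitCond alerts p.2),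
      ((fun pos => PySem.List.pyGetD top_accounts pos []) ∘ (·.1)) p = p.2 := by
    intro p hp
    have hpe := List.mem_of_mem_filter hp
    rw [PySem.List.mem_enumerate_iff] at hpe
    obtain ⟨k, hk, rfl⟩ := hpe
    simp [PySem.List.pyGetD_natCast, List.getElem?_eq_getElem hk]
  rw [List.map_congr_left this, pvEnum_filter_map_snd]

-- ===== VERDICT (by name: the statement is the Claim_ definition above) =====
theorem get_affected_accounts_from_alerts_py_spec : Claim_equal_get_affected_accounts_from_alerts_py := by
  intro alerts top_accounts _ _
  unfold Spec_get_affected_accounts_from_alerts_py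
  exact pvAB_eq alerts top_accounts
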